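-- pv_equiv track=rewrite | github.com/djeglin/aoc-2021 | src/day-6/index.py | updateGroups
-- ===== SOURCE A (Python) =====
-- def updateGroups(g):
-- 	i = 8
-- 	new = [0,0,0,0,0,0,0,0,0]
-- 	while i >= 0:
-- 		if i == 0:
-- 			new[8] += g[0]
-- 			new[6] += g[0]
-- 		else:
-- 			new[i - 1] += g[i]
-- 		i -= 1
-- 	return new
-- ===== SOURCE B (Python) =====
-- def updateGroups(g):
--     new = list(g[1:9]) + [g[0]]
--     new[6] += g[0]
--     return new
-- ===== Notes on version B (the rewrite author's own statement) =====
-- stated objective: simpler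
-- what changed: Replaces the index-by-index countdown loop with a single slice of indices 1..8 followed by the head plus one reset fix-up adding the head count at index 6.
-- outside the precondition, e.g. on updateGroups([1, 2, 3, 4, 5, 6, 7, 8]): A raises IndexError, B returns [2, 3, 4, 5, 6, 7, 9, 1]
import Mathlib
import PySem

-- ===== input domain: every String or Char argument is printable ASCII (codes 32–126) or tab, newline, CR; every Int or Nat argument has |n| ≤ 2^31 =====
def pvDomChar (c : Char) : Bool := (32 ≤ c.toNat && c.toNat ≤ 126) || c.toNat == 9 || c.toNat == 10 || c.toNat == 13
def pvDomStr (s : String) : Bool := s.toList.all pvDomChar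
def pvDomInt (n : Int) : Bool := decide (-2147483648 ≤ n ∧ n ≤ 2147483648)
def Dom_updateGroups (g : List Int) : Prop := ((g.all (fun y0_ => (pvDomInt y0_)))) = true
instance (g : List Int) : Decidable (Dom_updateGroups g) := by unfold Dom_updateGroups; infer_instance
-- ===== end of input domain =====

-- ===== PORT A =====
-- B replaces A's countdown loop with a slice plus one fix-up; equivalence proved for lists of length ≥ 9 (A raises IndexError otherwise).
-- in-place addition at an in-range index (guaranteed by Pre_)
def pyAddAt (xs : List Int) (i : Nat) (v : Int) : List Int :=
  xs.set i (xs.getD i 0 + v)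

-- the while loop of A: i counts down from 8; fuel only makes the recursion structural
def updateGroupsLoop (g : List Int) : Nat → Int → List Int → List Int
  | 0, _, new => new
  | fuel + 1, i, new =>
    if 0 ≤ i then
      let new' := if i = 0 then
          pyAddAt (pyAddAt new 8 (g.getD 0 0)) 6 (g.getD 0 0)
        else
          pyAddAt new (i - 1).toNat (g.getD i.toNat 0)
      updateGroupsLoop g fuel (i - 1) new'
    else new

def updateGroups (g : List Int) : List Int :=
  updateGroupsLoop g 9 8 [0,0,0,0,0,0,0,0,0]

-- ===== PORT B =====
def updateGroups_alt (g : List Int) : List Int :=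
  let new := PySem.List.slice g (some 1) (some 9) ++ [g.getD 0 0]
  new.set 6 (new.getD 6 0 + g.getD 0 0)

-- ===== PRECONDITION & SPEC =====
-- Pre_ excludes lists of fewer than 9 elements, on which A raises IndexError reading index 8.
def Pre_updateGroups (g : List Int) : Prop := 9 ≤ g.length
instance (g : List Int) : Decidable (Pre_updateGroups g) := by unfold Pre_updateGroups; infer_instance
def pvWitness_updateGroups : List Int := [3, 1, 4, 1, 5, 9, 2, 6, 5]
def Spec_updateGroups (g : List Int) (out : List Int) : Prop := out = updateGroups_alt g
instance (g : List Int) (out : List Int) : Decidable (Spec_updateGroups g out) := by unfold Spec_updateGroups; infer_instance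

-- ===== CLAIM (what is proved, stated in full; the proofs are below) =====
def Claim_equal_updateGroups : Prop := ∀ (g : List Int), Dom_updateGroups g → Pre_updateGroups g → Spec_updateGroups g (updateGroups g)

-- ===== LEMMAS AND PROOFS =====
theorem updateGroups_eq (g : List Int) (h : 9 ≤ g.length) :
    updateGroups g = updateGroups_alt g := by
  match g, h with
  | a0 :: a1 :: a2 :: a3 :: a4 :: a5 :: a6 :: a7 :: a8 :: rest, _ =>
    have hs : PySem.List.slice (a0 :: a1 :: a2 :: a3 :: a4 :: a5 :: a6 :: a7 :: a8 :: rest) (some 1) (some 9)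
        = [a1, a2, a3, a4, a5, a6, a7, a8] := by
      have := PySem.List.slice_natCast (a0 :: a1 :: a2 :: a3 :: a4 :: a5 :: a6 :: a7 :: a8 :: rest) 1 9
      simpa using this
    simp [updateGroups, updateGroupsLoop, pyAddAt, updateGroups_alt, hs, List.set, List.getD]

-- ===== VERDICT (by name: the statement is the Claim_ definition above) =====
theorem updateGroups_spec : Claim_equal_updateGroups := by
  intro g _ hpre
  exact updateGroups_eq g hpre
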